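-- pv_equiv track=rewrite | github.com/amitsng7/Leetcode | String substring Computation.py | string_comp
-- ===== SOURCE A (Python) =====
-- def string_comp(a):
--     order=[]
--     hash_map={}
--     output_string=''
--     for i in range(len(a)):
--         if a[i] in hash_map:
--             hash_map[a[i]]+=1
--         else:
--             order.append(a[i])
--             hash_map[a[i]]=1
--     for i in range(len(order)):
--         output_string=output_string+order[i]+str(hash_map[order[i]])
--     return output_string
-- ===== SOURCE B (Python) =====
-- def string_comp(a):
--     # Recursive elimination: peel off the first character, count it by how much
--     # the string shrinks when all its copies are removed, recurse on the remainder.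
--     if not a:
--         return ''
--     c = a[0]
--     rest = ''.join(ch for ch in a if ch != c)
--     return c + str(len(a) - len(rest)) + string_comp(rest)
-- ===== Notes on version B (the rewrite author's own statement) =====
-- stated objective: alternative
-- what changed: B is recursive with no auxiliary structures: it peels off the first character, measures its count as the length drop after deleting all its copies, and recurses on the filtered remainder, instead of A's single pass that maintains an order list and an incremental frequency dict and then a second emitting loop.
import Mathlib
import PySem

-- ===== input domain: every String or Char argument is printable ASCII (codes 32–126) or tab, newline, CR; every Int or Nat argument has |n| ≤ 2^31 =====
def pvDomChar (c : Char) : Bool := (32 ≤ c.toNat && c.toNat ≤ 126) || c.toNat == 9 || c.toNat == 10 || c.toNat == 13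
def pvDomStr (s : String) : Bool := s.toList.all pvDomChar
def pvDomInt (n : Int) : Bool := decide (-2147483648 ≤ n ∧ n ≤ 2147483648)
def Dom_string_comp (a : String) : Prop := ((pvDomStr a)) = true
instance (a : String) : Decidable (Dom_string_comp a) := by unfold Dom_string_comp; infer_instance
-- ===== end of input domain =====

-- B replaces A's single-pass order-list + frequency-dict construction by a recursion
-- with no auxiliary structures: peel the first character, count it by the length drop
-- after deleting all its copies, recurse on the remainder; objective: alternative.

-- ===== PORT A =====
-- step of A's first loop: state = (order, hash_map)
def stringCompStep (s : List Char × PySem.Dict Char Int) (c : Char) :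
    List Char × PySem.Dict Char Int :=
  if s.2.contains c then (s.1, s.2.modify c 0 (· + 1))
  else (s.1 ++ [c], s.2.insert c 1)

def string_comp (a : String) : String :=
  let st := a.toList.foldl stringCompStep ([], PySem.Dict.empty)
  -- hash_map[order[i]]: the key is always present, so getD 0 is exact here
  String.ofList (st.1.foldl (fun acc c => acc ++ [c] ++ PySem.Int.toChars (st.2.getD c 0)) [])

-- ===== PORT B =====
-- Source B's recursion on List Char: ''.join(ch for ch in a if ch != c) is the filter,
-- len(a) - len(rest) the length difference, str(…) is PySem.Int.toChars (exact)
def stringCompAltGo : List Char → List Char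
  | [] => []
  | c :: t =>
    let rest := (c :: t).filter (fun x => x != c)
    c :: (PySem.Int.toChars (((c :: t).length : Int) - (rest.length : Int)) ++ stringCompAltGo rest)
termination_by l => l.length
decreasing_by
  simp only [List.filter]
  simp only [bne_self_eq_false, List.length_cons]
  exact Nat.lt_succ_of_le (List.length_filter_le _ t)

def string_comp_alt (a : String) : String := String.ofList (stringCompAltGo a.toList)

-- ===== PRECONDITION & SPEC =====
def Spec_string_comp (a : String) (out : String) : Prop := out = string_comp_alt a
instance (a : String) (out : String) : Decidable (Spec_string_comp a out) := by unfold Spec_string_comp; infer_instance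

-- ===== CLAIM (what is proved, stated in full; the proofs are below) =====
def Claim_equal_string_comp : Prop := ∀ (a : String), Dom_string_comp a → Spec_string_comp a (string_comp a)

-- ===== LEMMAS AND PROOFS =====

-- invariant of A's first loop, relating its state to the processed prefix p
def stringCompInv (p : List Char) (st : List Char × PySem.Dict Char Int) : Prop :=
  st.1 = PySem.Set.ofList p ∧ (∀ c, st.2.contains c = p.contains c) ∧
    (∀ c, st.2.getD c 0 = p.count c)

theorem stringComp_loop_inv (xs : List Char) :
    ∀ (p : List Char) (st : List Char × PySem.Dict Char Int), stringCompInv p st →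
      stringCompInv (p ++ xs) (xs.foldl stringCompStep st) := by
  induction xs with
  | nil => intro p st h; simpa using h
  | cons c xs ih =>
    intro p st h
    obtain ⟨h1, h2, h3⟩ := h
    have : stringCompInv (p ++ [c]) (stringCompStep st c) := by
      unfold stringCompStep
      by_cases hc : c ∈ p
      · rw [if_pos (by simp [h2, hc])]
        refine ⟨?_, ?_, ?_⟩
        · rw [h1, PySem.Set.ofList_append_singleton,
            PySem.Set.add_of_mem (by simpa [PySem.Set.mem_ofList] using hc)]
        · intro c'
          rw [PySem.Dict.contains_modify, h2]
          rcases eq_or_ne c' c with rfl | hne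
          · simp [hc]
          · simp [hne]
        · intro c'
          rw [PySem.Dict.getD_modify]
          rcases eq_or_ne c' c with rfl | hne
          · simp [h3, List.count_append]
          · simp [hne, h3, List.count_append, Ne.symm hne]
      · rw [if_neg (by simp [h2, hc])]
        refine ⟨?_, ?_, ?_⟩
        · rw [h1, PySem.Set.ofList_append_singleton,
            PySem.Set.add_of_not_mem (by simpa [PySem.Set.mem_ofList] using hc)]
        · intro c'
          rw [PySem.Dict.contains_insert, h2]
          rcases eq_or_ne c' c with rfl | hne
          · simp
          · simp [hne]
        · intro c'
          rw [PySem.Dict.getD_insert]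
          rcases eq_or_ne c' c with rfl | hne
          · simp [List.count_append, List.count_eq_zero.mpr hc]
          · simp [hne, h3, List.count_append, Ne.symm hne]
    have := ih (p ++ [c]) _ this
    simpa [List.append_assoc] using this

theorem stringComp_state (xs : List Char) :
    stringCompInv xs (xs.foldl stringCompStep ([], PySem.Dict.empty)) := by
  have := stringComp_loop_inv xs [] ([], PySem.Dict.empty)
    ⟨rfl, by intro c; simp [PySem.Dict.contains_empty],
      by intro c; simp [PySem.Dict.getD_empty]⟩
  simpa using this

-- ordered dedup commutes with filtering
theorem ofList_filter (p : Char → Bool) (t : List Char) :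
    PySem.Set.ofList (t.filter p) = (PySem.Set.ofList t).filter p := by
  induction t with
  | nil => rfl
  | cons x t ih =>
    by_cases hx : p x = true
    · simp only [List.filter_cons, hx, if_pos, PySem.Set.ofList_cons, ih,
        PySem.Set.discard, List.filter_filter]
      rw [List.filter_congr]
      intro y _; simp [Bool.and_comm]
    · simp only [List.filter_cons, hx, PySem.Set.ofList_cons, ih, PySem.Set.discard,
        List.filter_filter, if_neg, Bool.false_eq_true, not_false_iff]
      rw [List.filter_congr]
      intro y hy
      rcases eq_or_ne y x with rfl | hne
      · simp [hx]
      · simp [hne]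

-- B's recursion produces, for each distinct char in first-occurrence order,
-- the char followed by its count in the whole list
theorem stringCompAltGo_eq (l : List Char) :
    stringCompAltGo l =
      (PySem.Set.ofList l).foldl
        (fun acc c => acc ++ [c] ++ PySem.Int.toChars (l.count c : Int)) [] := by
  simp only [List.append_assoc, List.singleton_append]
  rw [PySem.List.foldl_append_eq_flatMap (fun c => c :: PySem.Int.toChars (l.count c : Int))
    (PySem.Set.ofList l) []]
  simp only [List.nil_append]
  induction l using stringCompAltGo.induct with
  | case1 => simp [stringCompAltGo]
  | case2 c t rest ih =>
    rw [stringCompAltGo]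
    have hrest : rest = t.filter (fun x => x != c) := by
      simp [rest]
    have hlen : ((c :: t).length : Int) - (rest.length : Int) = ((c :: t).count c : Int) := by
      have : t.length = (t.filter (fun x => x != c)).length + (t.filter (fun x => !(x != c))).length :=
        List.length_eq_length_filter_add _
      have hc : (t.filter (fun x => !(x != c))).length = t.count c := by
        rw [← List.countP_eq_length_filter]
        unfold List.count
        congr 1
        funext y; simp [bne]
      simp only [hrest, List.count_cons_self, List.length_cons]
      omega
    have hof : PySem.Set.ofList rest = PySem.Set.discard (PySem.Set.ofList t) c := by
      rw [hrest, ofList_filter]; rfl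
    rw [hlen, PySem.Set.ofList_cons, List.flatMap_cons, ← hof, ih]
    simp only [List.cons_append]
    congr 2
    apply List.flatMap_congr
    intro x hx
    have hxr : x ∈ rest := by simpa [PySem.Set.mem_ofList] using hx
    have hne : x ≠ c := by
      rw [hrest] at hxr
      simp at hxr
      exact hxr.2
    congr 2
    rw [hrest, List.count_filter (by simp [hne]), List.count_cons_of_ne hne.symm]

-- ===== VERDICT (by name: the statement is the Claim_ definition above) =====
theorem string_comp_spec : Claim_equal_string_comp := by
  intro a _
  unfold Spec_string_comp string_comp string_comp_alt
  obtain ⟨h1, _, h3⟩ := stringComp_state a.toList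
  show String.ofList ((a.toList.foldl stringCompStep ([], PySem.Dict.empty)).1.foldl
    (fun acc c => acc ++ [c] ++ PySem.Int.toChars
      ((a.toList.foldl stringCompStep ([], PySem.Dict.empty)).2.getD c 0)) []) = _
  rw [h1]
  congr 1
  rw [PySem.List.foldl_congr_mem _ _
    (fun acc c => acc ++ [c] ++ PySem.Int.toChars (a.toList.count c : Int)) _
    (by intro acc c hc; rw [h3 c])]
  exact (stringCompAltGo_eq a.toList).symm
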